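-- pv_equiv track=rewrite | github.com/shntanuuhere/sqlserver | test_sql_server.py | _mask_conn_str
-- ===== SOURCE A (Python) =====
-- def _mask_conn_str(s: str) -> str:
--     # mask PWD if present
--     parts = s.split(";")
--     masked = []
--     for p in parts:
--         if p.upper().startswith("PWD="):
--             masked.append("PWD=****")
--         else:
--             masked.append(p)
--     return ";".join(masked)
-- ===== SOURCE B (Python) =====
-- def _mask_conn_str(s: str) -> str:
--     # stream over the string with str.partition instead of building a split list
--     res = ""
--     while True:
--         head, sep, tail = s.partition(";")
--         if head.upper().startswith("PWD="):
--             head = "PWD=****"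
--         res += head
--         if not sep:
--             return res
--         res += ";"
--         s = tail
-- ===== Notes on version B (the rewrite author's own statement) =====
-- stated objective: idiomatic
-- what changed: Replaced split-into-list / loop / join with a single streaming loop over str.partition that appends each (possibly masked) segment directly to the result string, building no intermediate list.
import Mathlib
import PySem

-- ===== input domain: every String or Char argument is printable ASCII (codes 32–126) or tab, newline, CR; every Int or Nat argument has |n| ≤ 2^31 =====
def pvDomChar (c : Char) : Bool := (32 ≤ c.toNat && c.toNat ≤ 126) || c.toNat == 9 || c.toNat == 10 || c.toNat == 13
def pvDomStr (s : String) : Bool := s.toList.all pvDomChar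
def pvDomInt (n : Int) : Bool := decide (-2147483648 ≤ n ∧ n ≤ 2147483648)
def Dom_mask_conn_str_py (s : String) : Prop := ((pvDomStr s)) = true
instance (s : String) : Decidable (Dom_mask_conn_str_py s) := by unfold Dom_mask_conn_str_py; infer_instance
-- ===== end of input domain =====

-- B replaces A's split-into-list / loop / join with a streaming str.partition loop that builds no intermediate list; objective: idiomatic.


-- ===== PORT A =====
-- parts = s.split(";"); loop appending masked pieces ('if p.upper().startswith("PWD=")'); ";".join(masked)
def mask_conn_str_py (s : String) : String :=
  String.ofList (PySem.Chars.join ";".toList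
    ((PySem.Chars.splitOn s.toList ";".toList).foldl (fun acc p =>
      acc ++ [if PySem.Chars.startswith (PySem.Chars.upper p) "PWD=".toList
              then "PWD=****".toList else p]) []))

-- ===== PORT B =====
-- if head.upper().startswith("PWD="): head = "PWD=****"
def pvMaskSeg (p : List Char) : List Char :=
  if PySem.Chars.startswith (PySem.Chars.upper p) "PWD=".toList
  then "PWD=****".toList else p

-- the while-True loop of Source B over (s, res); s.partition(";") is exact as takeWhile/dropWhile for the one-char separator ';'
def pvAltGo (cs res : List Char) : List Char :=
  let head := cs.takeWhile (· ≠ ';')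
  let rest := cs.dropWhile (· ≠ ';')
  if rest = [] then res ++ pvMaskSeg head            -- sep == "": return res
  else pvAltGo rest.tail (res ++ pvMaskSeg head ++ [';'])  -- res += head + ";"; s = tail
termination_by cs.length
decreasing_by
  have hle := List.length_dropWhile_le (p := fun c => decide (c ≠ ';')) (l := cs)
  rename_i hr
  cases h : cs.dropWhile (· ≠ ';') with
  | nil => exact absurd h hr
  | cons x t =>
    rw [h] at hle
    simp only [List.tail_cons, List.length_cons] at *
    omega

def mask_conn_str_py_alt (s : String) : String :=
  String.ofList (pvAltGo s.toList [])

-- ===== PRECONDITION & SPEC =====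
def Spec_mask_conn_str_py (s : String) (out : String) : Prop := out = mask_conn_str_py_alt s
instance (s : String) (out : String) : Decidable (Spec_mask_conn_str_py s out) := by unfold Spec_mask_conn_str_py; infer_instance

-- ===== CLAIM (what is proved, stated in full; the proofs are below) =====
def Claim_equal_mask_conn_str_py : Prop := ∀ (s : String), Dom_mask_conn_str_py s → Spec_mask_conn_str_py s (mask_conn_str_py s)

-- ===== LEMMAS AND PROOFS =====

-- reference shape of Python's split on the single character ';'
def pvSegs : List Char → List (List Char)
  | [] => [[]]
  | c :: rest =>
    if c = ';' then [] :: pvSegs rest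
    else (pvSegs rest).modifyHead (c :: ·)

lemma pvSegs_ne_nil (cs : List Char) : pvSegs cs ≠ [] := by
  induction cs with
  | nil => simp [pvSegs]
  | cons c rest ih =>
    simp only [pvSegs]
    split_ifs <;> simp_all [List.modifyHead]
    cases h : pvSegs rest <;> simp_all

lemma pv_go_eq (fuel : Nat) (l cur : List Char) (acc : List (List Char))
    (h : l.length ≤ fuel) :
    PySem.Chars.splitOn.go ";".toList fuel l cur acc =
      acc.reverse ++ (pvSegs l).modifyHead (cur.reverse ++ ·) := by
  induction l generalizing fuel cur acc with
  | nil =>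
    cases fuel with
    | zero => simp [PySem.Chars.splitOn.go, pvSegs, List.modifyHead]
    | succ f => simp [PySem.Chars.splitOn.go, pvSegs, List.modifyHead]
  | cons c rest ih =>
    cases fuel with
    | zero => simp at h
    | succ f =>
      simp only [PySem.Chars.splitOn.go]
      by_cases hc : c = ';'
      · subst hc
        rw [if_pos (by simp [List.isPrefixOf])]
        have hdrop : List.drop ";".toList.length (';' :: rest) = rest := by simp
        rw [hdrop]
        rw [ih f [] (cur.reverse :: acc) (by simpa using Nat.le_of_succ_le_succ h)]
        simp only [pvSegs, if_true]
        cases hs : pvSegs rest with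
        | nil => exact absurd hs (pvSegs_ne_nil rest)
        | cons a t => simp [List.modifyHead]
      · have hp : (";".toList).isPrefixOf (c :: rest) = false := by
          simp [List.isPrefixOf]
          exact fun h' => hc h'.symm
        rw [hp]
        simp only [Bool.false_eq_true, if_false]
        rw [ih f (c :: cur) acc (by simpa using Nat.le_of_succ_le_succ h)]
        simp only [pvSegs, if_neg hc, List.reverse_cons]
        congr 1
        cases hs : pvSegs rest with
        | nil => exact absurd hs (pvSegs_ne_nil rest)
        | cons a t => simp [List.modifyHead]

lemma pv_splitOn_eq (cs : List Char) :
    PySem.Chars.splitOn cs ";".toList = pvSegs cs := by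
  have := pv_go_eq (cs.length + 1) cs [] [] (Nat.le_succ _)
  rw [PySem.Chars.splitOn, this]
  cases hs : pvSegs cs with
  | nil => exact absurd hs (pvSegs_ne_nil cs)
  | cons a t => simp [List.modifyHead]

-- the takeWhile/dropWhile step of pvSegs
lemma pvSegs_step (cs : List Char) :
    pvSegs cs = cs.takeWhile (· ≠ ';') ::
      (match cs.dropWhile (· ≠ ';') with
       | [] => ([] : List (List Char))
       | _ :: t => pvSegs t) := by
  induction cs with
  | nil => simp [pvSegs]
  | cons c rest ih =>
    by_cases hc : c = ';'
    · subst hc; simp [pvSegs, List.takeWhile, List.dropWhile]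
    · simp only [pvSegs, List.takeWhile, List.dropWhile, hc, decide_not]
      rw [ih]
      simp [List.modifyHead]

-- the accumulator loop computes join of the masked segments
lemma pvAltGo_eq (cs res : List Char) :
    pvAltGo cs res = res ++ PySem.Chars.join ";".toList ((pvSegs cs).map pvMaskSeg) := by
  induction hl : cs.length using Nat.strong_induction_on generalizing cs res with
  | _ n ih =>
    subst hl
    rw [pvAltGo, pvSegs_step cs]
    cases h : cs.dropWhile (· ≠ ';') with
    | nil =>
      simp [PySem.Chars.join, List.intercalate]
    | cons x t =>
      have hlt : t.length < cs.length := by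
        have hle := List.length_dropWhile_le (p := fun c => decide (c ≠ ';')) (l := cs)
        rw [h] at hle; simpa using Nat.lt_of_lt_of_le (Nat.lt_succ_self _) hle
      rw [if_neg (List.cons_ne_nil x t)]
      simp only [List.tail_cons]
      rw [ih t.length hlt t _ rfl]
      cases hs : pvSegs t with
      | nil => exact absurd hs (pvSegs_ne_nil t)
      | cons a u =>
        simp [PySem.Chars.join_cons_cons, List.append_assoc]

-- ===== VERDICT (by name: the statement is the Claim_ definition above) =====
theorem mask_conn_str_py_spec : Claim_equal_mask_conn_str_py := by
  intro s _
  unfold Spec_mask_conn_str_py mask_conn_str_py mask_conn_str_py_alt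
  rw [pvAltGo_eq, pv_splitOn_eq, PySem.List.foldl_append_singleton_eq_map]
  rfl
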